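-- pv_equiv track=rewrite | github.com/ijo0r98/codingtest | programmers/v2/_KAKAO/2022/L1_신고결과받기.py | solution
-- ===== SOURCE A (Python) =====
-- import collections
--
-- def solution(id_list, report, k):
--     length = len(id_list)
--     answer = [0] * length
--     report = set(report)
--
--     reported_cnt = collections.defaultdict(int) # 신고당한 사람
--     id_dict = collections.defaultdict(list) # 신고 목록
--
--     for r in report:
--         ids = list(r.split(' '))
--         reported_cnt[ids[1]] += 1
--         id_dict[ids[0]].append(ids[1])
--
--     for i in range(length):
--         try:
--             for id in id_dict[id_list[i]]:
--                 if reported_cnt[id] >= k: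
--                     answer[i] += 1
--         except:
--             pass
--
--     return answer
-- ===== SOURCE B (Python) =====
-- def solution(id_list, report, k):
--     dedup = set(report)
--     reported_cnt = {}
--     for r in dedup:
--         target = r.split(' ')[1]
--         reported_cnt[target] = reported_cnt.get(target, 0) + 1
--     banned = {u for u, c in reported_cnt.items() if c >= k}
--     result = {}
--     for r in dedup:
--         parts = r.split(' ')
--         if parts[1] in banned:
--             result[parts[0]] = result.get(parts[0], 0) + 1
--     return [result.get(u, 0) for u in id_list]
-- ===== Notes on version B (the rewrite author's own statement) =====
-- stated objective: simpler
-- what changed: Replaces A's reporter->list-of-targets dict plus a per-user inner scan (with index loop, try/except and in-place answer mutation) by two flat counting passes over the deduped reports (distinct-reporter counts, then a result counter keyed by reporter guarded by a banned set) and a final lookup comprehension.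
import Mathlib
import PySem

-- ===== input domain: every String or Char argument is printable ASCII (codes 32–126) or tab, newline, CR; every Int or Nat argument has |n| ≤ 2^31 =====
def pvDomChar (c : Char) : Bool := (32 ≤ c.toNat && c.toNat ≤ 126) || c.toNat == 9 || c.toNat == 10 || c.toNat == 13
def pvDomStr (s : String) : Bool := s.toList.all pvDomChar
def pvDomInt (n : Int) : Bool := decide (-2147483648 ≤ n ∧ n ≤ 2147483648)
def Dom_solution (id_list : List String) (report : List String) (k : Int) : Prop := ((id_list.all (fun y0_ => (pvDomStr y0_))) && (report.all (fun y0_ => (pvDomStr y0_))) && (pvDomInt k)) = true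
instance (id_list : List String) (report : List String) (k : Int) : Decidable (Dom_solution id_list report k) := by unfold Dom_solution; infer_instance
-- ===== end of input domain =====

-- B replaces A's reporter->target-list dict and per-user inner scan by two flat counting passes
-- over the deduped reports plus a final lookup comprehension (objective: simpler; same cost).
-- Python's set iteration order is not modelled; both results are order-independent (pure counts).

-- ===== PORT A =====
-- 'ids[1]'/'ids[0]' are ported with List.getD; exact under Pre_solution (Python raises IndexError outside it)
def solution (id_list : List String) (report : List String) (k : Int) : List Int :=
  let length := id_list.length
  let answer : List Int := List.replicate length 0
  let rep := PySem.Set.ofList report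
  let st := rep.foldl
    (fun (p : PySem.Dict String Int × PySem.Dict String (List String)) r =>
      let ids := (PySem.Str.split? r " ").getD []
      (p.1.modify (ids.getD 1 "") 0 (· + 1),
       p.2.modify (ids.getD 0 "") [] (· ++ [ids.getD 1 ""])))
    (PySem.Dict.empty, PySem.Dict.empty)
  (PySem.List.pyRange 0 (PySem.List.len id_list) 1).foldl
    (fun ans i =>
      (st.2.getD (PySem.List.pyGetD id_list i "") []).foldl
        (fun a id => if k ≤ st.1.getD id 0 then PySem.List.pySetD a i (PySem.List.pyGetD a i 0 + 1) else a)
        ans)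
    answer

-- ===== PORT B =====
def solution_alt (id_list : List String) (report : List String) (k : Int) : List Int :=
  let dedup := PySem.Set.ofList report
  let reported_cnt := dedup.foldl
    (fun (d : PySem.Dict String Int) r =>
      let target := ((PySem.Str.split? r " ").getD []).getD 1 ""
      d.insert target (d.getD target 0 + 1))
    PySem.Dict.empty
  let banned : PySem.Set String :=
    PySem.Set.ofList (reported_cnt.items.filterMap (fun p => if k ≤ p.2 then some p.1 else none))
  let result := dedup.foldl
    (fun (d : PySem.Dict String Int) r =>
      let parts := (PySem.Str.split? r " ").getD []
      if banned.contains (parts.getD 1 "") then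
        d.insert (parts.getD 0 "") (d.getD (parts.getD 0 "") 0 + 1)
      else d)
    PySem.Dict.empty
  id_list.map (fun u => result.getD u 0)

-- ===== PRECONDITION & SPEC =====
-- Pre_ excludes report entries without a space: there A's first loop raises IndexError on ids[1].
def Pre_solution (id_list : List String) (report : List String) (k : Int) : Prop :=
  ∀ r ∈ report, 2 ≤ ((PySem.Str.split? r " ").getD []).length
instance (id_list : List String) (report : List String) (k : Int) : Decidable (Pre_solution id_list report k) := by unfold Pre_solution; infer_instance
def pvWitness_solution : List String × List String × Int := (["muzi", "apeach"], ["muzi apeach", "apeach muzi", "muzi apeach"], 1)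
def Spec_solution (id_list : List String) (report : List String) (k : Int) (out : List Int) : Prop := out = solution_alt id_list report k
instance (id_list : List String) (report : List String) (k : Int) (out : List Int) : Decidable (Spec_solution id_list report k out) := by unfold Spec_solution; infer_instance

-- ===== CLAIM =====
def Claim_equal_solution : Prop := ∀ (id_list : List String) (report : List String) (k : Int), Dom_solution id_list report k → Pre_solution id_list report k → Spec_solution id_list report k (solution id_list report k)

-- ===== LEMMAS AND PROOFS =====

-- proof-only shorthands for ids[1] / ids[0] of r.split(' ')
abbrev pvTgt (r : String) : String := ((PySem.Str.split? r " ").getD []).getD 1 ""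
abbrev pvSrc (r : String) : String := ((PySem.Str.split? r " ").getD []).getD 0 ""

-- the common value of answer[i] for user u, over the deduped reports
def pvVal (report : List String) (k : Int) (u : String) : Int :=
  ((((PySem.Set.ofList report).filter (fun r => pvSrc r == u)).map pvTgt).countP
     (fun v => decide (k ≤ (((PySem.Set.ofList report).map pvTgt).count v : Int))) : Int)

lemma pv_inner (p : String → Prop) [DecidablePred p] (j : Nat) (lst : List String) :
    ∀ (a : List Int), j < a.length →
    lst.foldl (fun a id => if p id then a.set j (a.getD j 0 + 1) else a) a
      = a.set j (a.getD j 0 + (lst.countP (fun id => decide (p id)) : Int)) := by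
  induction lst with
  | nil =>
      intro a hj
      simp [List.getElem?_eq_getElem hj, List.set_getElem_self]
  | cons x t ih =>
      intro a hj
      simp only [List.foldl_cons]
      by_cases hx : p x
      · rw [if_pos hx, ih _ (by simpa using hj), List.set_set]
        have hgd : (a.set j (a.getD j 0 + 1)).getD j 0 = a.getD j 0 + 1 := by
          rw [List.getD_eq_getElem _ _ (by simpa using hj), List.getElem_set]
          simp
        rw [hgd, List.countP_cons_of_pos (by simpa using hx)]
        congr 1
        push_cast
        ring
      · rw [if_neg hx, ih _ hj, List.countP_cons_of_neg (by simpa using hx)]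

lemma pv_outer (p : String → Prop) [DecidablePred p] (lstF : Nat → List String) :
    ∀ (n : Nat) (init : List Int), n ≤ init.length →
    (List.range n).foldl
        (fun ans j => (lstF j).foldl
          (fun a id => if p id then a.set j (a.getD j 0 + 1) else a) ans) init
      = init.mapIdx (fun j x =>
          if j < n then x + ((lstF j).countP (fun id => decide (p id)) : Int) else x) := by
  intro n
  induction n with
  | zero =>
      intro init h
      apply List.ext_getElem (by simp)
      intro i h1 h2
      simp [List.getElem_mapIdx]
  | succ n ih =>
      intro init h
      rw [List.range_succ, List.foldl_append, ih init (by omega)]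
      simp only [List.foldl_cons, List.foldl_nil]
      rw [pv_inner p n (lstF n) _ (by simp; omega)]
      apply List.ext_getElem (by simp)
      intro i h1 h2
      have hn : n < init.length := by omega
      have hmapn : (init.mapIdx (fun j x =>
          if j < n then x + ((lstF j).countP (fun id => decide (p id)) : Int) else x)).getD n 0
          = init[n] := by
        rw [List.getD_eq_getElem _ _ (by simpa using hn), List.getElem_mapIdx]
        simp
      simp only [hmapn]
      simp only [List.getElem_set, List.getElem_mapIdx]
      by_cases hni : n = i
      · subst hni
        simp
      · rw [if_neg hni]
        by_cases hilt : i < n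
        · rw [if_pos hilt, if_pos (by omega)]
        · rw [if_neg hilt, if_neg (by omega)]


lemma pv_cnt_getD (report : List String) (v : String) :
    (List.foldl (fun (d : PySem.Dict String Int) r => d.modify (pvTgt r) 0 (· + 1))
        PySem.Dict.empty (PySem.Set.ofList report)).getD v 0
      = (((PySem.Set.ofList report).map pvTgt).count v : Int) := by
  rw [← List.foldl_map (f := pvTgt) (g := fun (d : PySem.Dict String Int) x => d.modify x 0 (· + 1)),
      PySem.Dict.getD_foldl_modify_add_one, PySem.Dict.getD_empty, zero_add]

lemma pv_idd_getD (report : List String) (w : String) :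
    (List.foldl (fun (d : PySem.Dict String (List String)) r => d.modify (pvSrc r) [] (· ++ [pvTgt r]))
        PySem.Dict.empty (PySem.Set.ofList report)).getD w []
      = ((PySem.Set.ofList report).filter (fun r => pvSrc r == w)).map pvTgt := by
  have h : (fun (d : PySem.Dict String (List String)) r => d.modify (pvSrc r) [] (· ++ [pvTgt r]))
      = fun d r => (fun (d : PySem.Dict String (List String)) (p : String × String) =>
          d.modify p.1 [] (· ++ [p.2])) d ((fun r => (pvSrc r, pvTgt r)) r) := rfl
  rw [h, ← List.foldl_map (f := fun r => (pvSrc r, pvTgt r))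
      (g := fun (d : PySem.Dict String (List String)) (p : String × String) => d.modify p.1 [] (· ++ [p.2])),
      PySem.Dict.getD_foldl_modify_append, PySem.Dict.getD_empty]
  rw [List.nil_append, List.filter_map, List.map_map]
  rfl

lemma pv_A_eq (id_list report : List String) (k : Int) :
    solution id_list report k = id_list.map (pvVal report k) := by
  unfold solution
  simp only []
  rw [PySem.List.foldl_prod_mk (f := fun (d : PySem.Dict String Int) r => d.modify (pvTgt r) 0 (· + 1))
      (g := fun (d : PySem.Dict String (List String)) r => d.modify (pvSrc r) [] (· ++ [pvTgt r]))]
  rw [PySem.List.len_eq, PySem.List.pyRange_one]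
  simp only [zero_add, sub_zero, Int.toNat_natCast]
  rw [List.foldl_map]
  simp only [pv_cnt_getD, pv_idd_getD, PySem.List.pyGetD_natCast, PySem.List.pySetD_natCast]
  rw [pv_outer (fun id => k ≤ (((PySem.Set.ofList report).map pvTgt).count id : Int))
      (fun j => ((PySem.Set.ofList report).filter (fun r => pvSrc r == id_list.getD j "")).map pvTgt)
      id_list.length (List.replicate id_list.length 0) (by simp)]
  apply List.ext_getElem (by simp)
  intro i h1 h2
  simp only [List.getElem_mapIdx, List.getElem_replicate, List.getElem_map]
  have hi : i < id_list.length := by simpa using h2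
  rw [if_pos hi, List.getD_eq_getElem _ _ hi]
  simp [pvVal]

lemma pv_banned_contains (report : List String) (k : Int) (w : String)
    (hw : w ∈ (PySem.Set.ofList report).map pvTgt) :
    (PySem.Set.ofList
        ((PySem.Dict.counter ((PySem.Set.ofList report).map pvTgt)).items.filterMap
          (fun p => if k ≤ p.2 then some p.1 else none))).contains w
      = decide (k ≤ ((((PySem.Set.ofList report).map pvTgt)).count w : Int)) := by
  rw [PySem.Dict.items_counter, List.filterMap_map]
  by_cases hk : k ≤ ((((PySem.Set.ofList report).map pvTgt)).count w : Int)
  · rw [decide_eq_true hk]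
    rw [PySem.Set.contains_iff, PySem.Set.mem_ofList, List.mem_filterMap]
    refine ⟨w, ?_, ?_⟩
    · rw [PySem.Set.mem_ofList]; exact hw
    · simp [Function.comp, hk]
  · rw [decide_eq_false hk]
    rw [← Bool.not_eq_true, PySem.Set.contains_iff, PySem.Set.mem_ofList, List.mem_filterMap]
    rintro ⟨a, ha, hae⟩
    simp only [Function.comp] at hae
    split_ifs at hae with h
    cases Option.some_injective _ hae
    exact hk h

lemma pv_B_eq (id_list report : List String) (k : Int) :
    solution_alt id_list report k = id_list.map (pvVal report k) := by
  unfold solution_alt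
  simp only []
  rw [← List.foldl_map (f := pvTgt) (g := fun (d : PySem.Dict String Int) x => d.insert x (d.getD x 0 + 1)),
      PySem.Dict.foldl_insert_getD_add_one_eq_counter]
  rw [PySem.List.foldl_congr_mem' (g := fun (d : PySem.Dict String Int) r =>
        if decide (k ≤ ((((PySem.Set.ofList report).map pvTgt)).count (pvTgt r) : Int)) then
          d.insert (pvSrc r) (d.getD (pvSrc r) 0 + 1) else d)
      (h := by
        intro r hr d
        rw [pv_banned_contains report k (pvTgt r) (List.mem_map_of_mem hr)])]
  rw [PySem.List.foldl_if_eq_foldl_filter,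
      ← List.foldl_map (f := pvSrc) (g := fun (d : PySem.Dict String Int) x => d.insert x (d.getD x 0 + 1)),
      PySem.Dict.foldl_insert_getD_add_one_eq_counter]
  apply List.map_congr_left
  intro u _
  rw [PySem.Dict.getD_counter, pvVal]
  congr 1
  rw [List.count_eq_countP, List.countP_map, List.countP_filter, List.countP_map, List.countP_filter]
  apply List.countP_congr
  intro r _
  simp only [Function.comp]
  constructor <;> intro h <;> simp_all [Bool.and_comm]

-- ===== VERDICT =====
theorem solution_spec : Claim_equal_solution := by
  intro id_list report k _ _
  unfold Spec_solution
  rw [pv_A_eq, pv_B_eq]
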